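-- pv_equiv track=rewrite | github.com/akathorn/codejam | 2009/Round 1C/base/base.py | to_minimum
-- ===== SOURCE A (Python) =====
-- from typing import Any, Callable, List, Tuple, TypeVar, Union
--
-- def to_minimum(symbols: str) -> Tuple[str, int]:
--     result_str = "1"
--     mapping = {symbols[0]: "1"}
--     counter = 0
--     for c in symbols[1:]:
--         if c not in mapping:
--             if counter == 0:
--                 mapping[c] = "0"
--                 counter = 2
--             elif counter < 10:
--                 mapping[c] = str(counter)
--                 counter += 1
--             else:
--                 mapping[c] = chr(counter)
--                 counter += 1
--         result_str += mapping[c]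
--
--     return result_str, max(counter, 2)
-- ===== SOURCE B (Python) =====
-- def to_minimum(symbols: str):
--     symbols[0]  # empty input raises IndexError, as in the original
--     distinct = list(dict.fromkeys(symbols))
--     mapping = {}
--     for i, c in enumerate(distinct):
--         mapping[c] = "1" if i == 0 else "0" if i == 1 else (str(i) if i < 10 else chr(i))
--     return "".join(mapping[c] for c in symbols), max(len(distinct), 2)
-- ===== Notes on version B (the rewrite author's own statement) =====
-- stated objective: alternative
-- what changed: A interleaves digit assignment and output building in one stateful pass with a counter; B first computes the ordered distinct symbols (dict.fromkeys), assigns each symbol its digit by a closed form on its index, then translates the whole string in a separate join pass.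
import Mathlib
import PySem

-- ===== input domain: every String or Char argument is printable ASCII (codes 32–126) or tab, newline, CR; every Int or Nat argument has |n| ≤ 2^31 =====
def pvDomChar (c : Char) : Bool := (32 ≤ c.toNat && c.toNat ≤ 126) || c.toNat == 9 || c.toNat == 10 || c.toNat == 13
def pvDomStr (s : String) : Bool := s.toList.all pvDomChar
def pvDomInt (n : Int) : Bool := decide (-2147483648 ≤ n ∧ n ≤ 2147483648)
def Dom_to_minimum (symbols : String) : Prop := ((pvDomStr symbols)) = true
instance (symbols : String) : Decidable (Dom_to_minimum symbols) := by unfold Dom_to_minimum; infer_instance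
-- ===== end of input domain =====

-- B restructures A's single stateful assign-and-append pass into: ordered distinct symbols,
-- a closed-form digit per index, then a separate translation pass (objective: alternative).

-- ===== PORT A =====
-- A's single pass: result string, mapping dict and counter carried together through one fold.
def to_minimum (symbols : String) : String × Int :=
  match symbols.toList with
  | [] => ("", 0)  -- unreachable under Pre_: Python raises IndexError on symbols[0]
  | c0 :: rest =>
    let st := rest.foldl
      (fun (st : List Char × PySem.Dict Char (List Char) × Int) c =>
        let res := st.1
        let mapping := st.2.1
        let counter := st.2.2
        let (mapping, counter) :=
          if mapping.contains c then (mapping, counter)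
          else if counter = 0 then (mapping.insert c ['0'], (2 : Int))
          else if counter < 10 then (mapping.insert c (PySem.Int.toChars counter), counter + 1)
          else (mapping.insert c [Char.ofNat counter.toNat], counter + 1)
        (res ++ mapping.getD c [], mapping, counter))
      (['1'], (PySem.Dict.empty).insert c0 ['1'], (0 : Int))
    (String.ofList st.1, max st.2.2 2)

-- ===== PORT B =====
-- digit for the i-th distinct symbol: "1" if i==0 else "0" if i==1 else (str(i) if i<10 else chr(i))
def pvDigitB (i : Int) : List Char :=
  if i = 0 then ['1'] else if i = 1 then ['0']
  else if i < 10 then PySem.Int.toChars i else [Char.ofNat i.toNat]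

-- the mapping built from the ordered distinct symbols by index (B's assignment loop)
def pvMapOf (distinct : List Char) : PySem.Dict Char (List Char) :=
  (PySem.List.enumerate distinct 0).foldl (fun m p => m.insert p.2 (pvDigitB p.1)) PySem.Dict.empty

def to_minimum_alt (symbols : String) : String × Int :=
  match PySem.Str.pyGet? symbols 0 with   -- the explicit symbols[0]
  | none => ("", 0)  -- unreachable under Pre_: IndexError
  | some _ =>
    let distinct := PySem.List.dedup symbols.toList  -- list(dict.fromkeys(symbols))
    let mapping := pvMapOf distinct
    (String.ofList (symbols.toList.map (fun c => mapping.getD c [])).flatten,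
     max (distinct.length : Int) 2)

-- ===== PRECONDITION & SPEC =====
-- Pre_ excludes only the empty string, on which both Pythons raise IndexError at symbols[0].
def Pre_to_minimum (symbols : String) : Prop := symbols.toList ≠ []
instance (symbols : String) : Decidable (Pre_to_minimum symbols) := by unfold Pre_to_minimum; infer_instance
def pvWitness_to_minimum : String := "aab"

def Spec_to_minimum (symbols : String) (out : String × Int) : Prop := out = to_minimum_alt symbols
instance (symbols : String) (out : String × Int) : Decidable (Spec_to_minimum symbols out) := by unfold Spec_to_minimum; infer_instance

-- ===== CLAIM (what is proved, stated in full; the proofs are below) =====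
def Claim_equal_to_minimum : Prop := ∀ (symbols : String), Dom_to_minimum symbols → Pre_to_minimum symbols → Spec_to_minimum symbols (to_minimum symbols)

-- ===== LEMMAS AND PROOFS =====

-- proof-only helpers: A's counter as a function of the distinct symbols seen so far,
-- and the joint "translate rest, extending the distinct list" recursion both ports follow.
def pvCounterOf (ds : List Char) : Int := if ds.length = 1 then 0 else (ds.length : Int)

def pvTrans (ds : List Char) : List Char → List Char × List Char
  | [] => ([], ds)
  | c :: r =>
    if c ∈ ds then
      (pvDigitB (List.idxOf c ds) ++ (pvTrans ds r).1, (pvTrans ds r).2)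
    else
      (pvDigitB ds.length ++ (pvTrans (ds ++ [c]) r).1, (pvTrans (ds ++ [c]) r).2)

theorem pvMapOf_append (ds : List Char) (c : Char) :
    pvMapOf (ds ++ [c]) = (pvMapOf ds).insert c (pvDigitB ds.length) := by
  simp [pvMapOf, PySem.List.enumerate_append, List.foldl_append,
        PySem.List.enumerate_cons, PySem.List.enumerate_nil]

theorem keys_pvMapOf (ds : List Char) (h : ds.Nodup) : (pvMapOf ds).keys = ds := by
  rw [pvMapOf, PySem.Dict.keys_foldl_insert_key _ (fun p : Int × Char => p.2) (fun m p => pvDigitB p.1) _]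
  rw [PySem.List.map_snd_enumerate, PySem.Dict.keys_empty]
  show PySem.Set.update [] ds = ds
  rw [PySem.Set.update, ← PySem.Set.ofList_eq_foldl, PySem.Set.ofList_eq_self_of_nodup _ h]

theorem contains_pvMapOf (ds : List Char) (h : ds.Nodup) (c : Char) :
    (pvMapOf ds).contains c = decide (c ∈ ds) := by
  rw [PySem.Dict.contains_eq_decide_mem_keys, keys_pvMapOf ds h]

theorem getD_pvMapOf (ds : List Char) (h : ds.Nodup) (c : Char) (hc : c ∈ ds) :
    (pvMapOf ds).getD c [] = pvDigitB (List.idxOf c ds) := by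
  have hlt : List.idxOf c ds < ds.length := List.idxOf_lt_length_of_mem hc
  have hmem : ((0 + (List.idxOf c ds : Int), c) : Int × Char) ∈ PySem.List.enumerate ds 0 := by
    rw [PySem.List.mem_enumerate_iff]
    exact ⟨List.idxOf c ds, hlt, by rw [List.getElem_idxOf hlt]⟩
  have hit : ((c, pvDigitB (List.idxOf c ds)) : Char × List Char) ∈ (pvMapOf ds).items := by
    rw [pvMapOf, PySem.Dict.items_foldl_insert_fresh _ (fun p : Int × Char => p.2) (fun p : Int × Char => pvDigitB p.1) _
        (fun a _ => PySem.Dict.contains_empty _) (by rw [PySem.List.map_snd_enumerate]; exact h)]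
    refine List.mem_append.mpr (Or.inr ?_)
    exact List.mem_map.mpr ⟨(0 + (List.idxOf c ds : Int), c), hmem, by simp⟩
  exact PySem.Dict.getD_of_mem_items _ hit (by rw [keys_pvMapOf ds h]; exact h) []

theorem pvTrans_snd_foldl (r : List Char) : ∀ ds : List Char,
    (pvTrans ds r).2 = List.foldl PySem.Set.add ds r := by
  induction r with
  | nil => intro ds; simp [pvTrans]
  | cons c r ih =>
    intro ds
    by_cases hc : c ∈ ds
    · simp [pvTrans, hc, ih]
    · simp [pvTrans, hc, ih]

theorem pvTrans_prefix (r : List Char) : ∀ ds : List Char, ds <+: (pvTrans ds r).2 := by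
  induction r with
  | nil => intro ds; simp [pvTrans]
  | cons c r ih =>
    intro ds
    by_cases hc : c ∈ ds
    · simpa [pvTrans, hc] using ih ds
    · simp only [pvTrans, if_neg hc]
      exact List.IsPrefix.trans (List.prefix_append ds [c]) (ih (ds ++ [c]))

theorem pvTrans_mem (r : List Char) : ∀ (ds : List Char) (x : Char),
    x ∈ ds ∨ x ∈ r → x ∈ (pvTrans ds r).2 := by
  induction r with
  | nil =>
    intro ds x h
    rcases h with h | h
    · simpa [pvTrans] using h
    · simp at h
  | cons c r ih =>
    intro ds x h
    by_cases hc : c ∈ ds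
    · simp only [pvTrans, if_pos hc]
      refine ih ds x ?_
      rcases h with h | h
      · exact Or.inl h
      · rcases List.mem_cons.mp h with rfl | h
        · exact Or.inl hc
        · exact Or.inr h
    · simp only [pvTrans, if_neg hc]
      refine ih (ds ++ [c]) x ?_
      rcases h with h | h
      · exact Or.inl (List.mem_append.mpr (Or.inl h))
      · rcases List.mem_cons.mp h with rfl | h
        · exact Or.inl (List.mem_append.mpr (Or.inr (by simp)))
        · exact Or.inr h

theorem pvIdxOf_of_prefix {ds t : List Char} (hp : ds <+: t) {c : Char} (hc : c ∈ ds) :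
    List.idxOf c t = List.idxOf c ds := by
  obtain ⟨u, rfl⟩ := hp
  rw [List.idxOf_append, if_pos hc]

theorem pvIdxOf_fresh {ds t : List Char} {c : Char} (hp : (ds ++ [c]) <+: t) (hc : c ∉ ds) :
    List.idxOf c t = ds.length := by
  obtain ⟨u, rfl⟩ := hp
  rw [List.append_assoc, List.idxOf_append, if_neg hc, List.idxOf_append, if_pos (by simp)]
  simp [List.idxOf_cons_self]

theorem pvNodup_append (ds : List Char) (c : Char) (h : ds.Nodup) (hc : c ∉ ds) :
    (ds ++ [c]).Nodup := by
  rw [List.nodup_append]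
  refine ⟨h, List.nodup_singleton c, ?_⟩
  intro a ha b hb
  rw [List.mem_singleton] at hb
  subst hb
  intro he
  exact hc (he ▸ ha)

theorem pvTrans_fst (r : List Char) : ∀ ds : List Char, ds.Nodup →
    (pvTrans ds r).1
      = (r.map (fun c => pvDigitB (List.idxOf c (pvTrans ds r).2))).flatten := by
  induction r with
  | nil => intro ds _; simp [pvTrans]
  | cons c r ih =>
    intro ds h
    by_cases hc : c ∈ ds
    · simp only [pvTrans, if_pos hc, List.map_cons, List.flatten_cons]
      rw [ih ds h, pvIdxOf_of_prefix (pvTrans_prefix r ds) hc]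
    · simp only [pvTrans, if_neg hc, List.map_cons, List.flatten_cons]
      have h' : (ds ++ [c]).Nodup := pvNodup_append ds c h hc
      rw [ih (ds ++ [c]) h', pvIdxOf_fresh (pvTrans_prefix r (ds ++ [c])) hc]

-- A's fresh-symbol step, expressed on the distinct-symbols abstraction
theorem pvStepFresh (ds : List Char) (c : Char) (hne : ds ≠ []) :
    (if pvCounterOf ds = 0 then ((pvMapOf ds).insert c ['0'], (2 : Int))
     else if pvCounterOf ds < 10 then
       ((pvMapOf ds).insert c (PySem.Int.toChars (pvCounterOf ds)), pvCounterOf ds + 1)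
     else ((pvMapOf ds).insert c [Char.ofNat (pvCounterOf ds).toNat], pvCounterOf ds + 1))
    = (pvMapOf (ds ++ [c]), pvCounterOf (ds ++ [c])) := by
  have hlen : 1 ≤ ds.length := List.length_pos_of_ne_nil hne
  rw [pvMapOf_append]
  rcases Nat.lt_or_ge ds.length 2 with hl | hl
  · have h1 : ds.length = 1 := by omega
    simp [pvCounterOf, pvDigitB, h1]
  · have hne1 : ds.length ≠ 1 := by omega
    have hcnt : pvCounterOf ds = (ds.length : Int) := by simp [pvCounterOf, hne1]
    have hcnt' : pvCounterOf (ds ++ [c]) = (ds.length : Int) + 1 := by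
      have h2 : (ds ++ [c]).length = ds.length + 1 := by simp
      simp [pvCounterOf, h2, hne]
    rw [hcnt, hcnt']
    have hnz : ¬ ((ds.length : Int)) = 0 := by omega
    have hne1' : ¬ ((ds.length : Int)) = 1 := by omega
    rcases Nat.lt_or_ge ds.length 10 with h10 | h10
    · have hlt : ((ds.length : Int)) < 10 := by omega
      have hd : pvDigitB ds.length = PySem.Int.toChars (ds.length : Int) := by
        simp [pvDigitB, hne, hne1', hlt]
      rw [if_neg hnz, if_pos hlt, hd]
    · have hge : ¬ ((ds.length : Int)) < 10 := by omega
      have hd : pvDigitB ds.length = [Char.ofNat (ds.length : Int).toNat] := by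
        simp [pvDigitB, hne, hne1', hge]
      rw [if_neg hnz, if_neg hge, hd]

-- A's whole loop: from any nonempty Nodup distinct-prefix state it computes pvTrans
theorem pvAloop (rest : List Char) : ∀ (ds acc : List Char), ds ≠ [] → ds.Nodup →
    rest.foldl
      (fun (st : List Char × PySem.Dict Char (List Char) × Int) c =>
        let res := st.1
        let mapping := st.2.1
        let counter := st.2.2
        let (mapping, counter) :=
          if mapping.contains c then (mapping, counter)
          else if counter = 0 then (mapping.insert c ['0'], (2 : Int))
          else if counter < 10 then (mapping.insert c (PySem.Int.toChars counter), counter + 1)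
          else (mapping.insert c [Char.ofNat counter.toNat], counter + 1)
        (res ++ mapping.getD c [], mapping, counter))
      (acc, pvMapOf ds, pvCounterOf ds)
    = (acc ++ (pvTrans ds rest).1, pvMapOf (pvTrans ds rest).2, pvCounterOf (pvTrans ds rest).2) := by
  induction rest with
  | nil => intro ds acc _ _; simp [pvTrans]
  | cons c r ih =>
    intro ds acc hne h
    rw [List.foldl_cons]
    by_cases hc : c ∈ ds
    · have hcont : (pvMapOf ds).contains c = true := by
        rw [contains_pvMapOf ds h]; simp [hc]
      simp only [hcont, if_true]
      rw [getD_pvMapOf ds h c hc, ih ds _ hne h]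
      simp [pvTrans, hc, List.append_assoc]
    · have hcont : (pvMapOf ds).contains c = false := by
        rw [contains_pvMapOf ds h]; simp [hc]
      simp only [hcont, Bool.false_eq_true, if_false]
      simp only [pvStepFresh ds c hne]
      have h' : (ds ++ [c]).Nodup := pvNodup_append ds c h hc
      have hne' : ds ++ [c] ≠ [] := by simp
      have hidx : List.idxOf c (ds ++ [c]) = ds.length := by
        rw [List.idxOf_append, if_neg hc, List.idxOf_cons_self]
        omega
      rw [getD_pvMapOf (ds ++ [c]) h' c (by simp), hidx, ih (ds ++ [c]) _ hne' h']
      simp [pvTrans, hc, List.append_assoc]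

-- ===== VERDICT (by name: the statement is the Claim_ definition above) =====
theorem to_minimum_spec : Claim_equal_to_minimum := by
  intro s _ hpre
  unfold Spec_to_minimum
  cases hs : s.toList with
  | nil => exact absurd hs hpre
  | cons c0 rest =>
    have hnod1 : ([c0] : List Char).Nodup := List.nodup_singleton c0
    have hF : PySem.List.dedup (c0 :: rest) = (pvTrans [c0] rest).2 := by
      rw [pvTrans_snd_foldl, PySem.List.dedup_eq_ofList, PySem.Set.ofList_eq_foldl,
          List.foldl_cons]
      congr 1
    have hFnodup : (pvTrans [c0] rest).2.Nodup := by
      rw [← hF, PySem.List.dedup_eq_ofList]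
      exact PySem.Set.nodup_ofList _
    have hFpre : [c0] <+: (pvTrans [c0] rest).2 := pvTrans_prefix rest [c0]
    have hc0F : c0 ∈ (pvTrans [c0] rest).2 := hFpre.subset (by simp)
    have hinit : ((['1'], (PySem.Dict.empty).insert c0 ['1'], (0 : Int)) :
        List Char × PySem.Dict Char (List Char) × Int)
        = (['1'], pvMapOf [c0], pvCounterOf [c0]) := by
      have hmap0 : (PySem.Dict.empty).insert c0 ['1'] = pvMapOf [c0] := by
        simp [pvMapOf, PySem.List.enumerate_cons, PySem.List.enumerate_nil, pvDigitB]
      rw [hmap0]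
      simp [pvCounterOf]
    have hget : PySem.Str.pyGet? s 0 = some c0 := by
      simp [hs]
    have hstr : (['1'] ++ (pvTrans [c0] rest).1)
        = ((c0 :: rest).map
            (fun c => (pvMapOf (pvTrans [c0] rest).2).getD c [])).flatten := by
      simp only [List.map_cons, List.flatten_cons]
      congr 1
      · rw [getD_pvMapOf _ hFnodup c0 hc0F, pvIdxOf_of_prefix hFpre (by simp),
            List.idxOf_cons_self]
        norm_num [pvDigitB]
      · rw [pvTrans_fst rest [c0] hnod1]
        refine congrArg List.flatten (List.map_congr_left fun c hcr => ?_)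
        rw [getD_pvMapOf _ hFnodup c (pvTrans_mem rest [c0] c (Or.inr hcr))]
    have hint : max (pvCounterOf (pvTrans [c0] rest).2) 2
        = max (((pvTrans [c0] rest).2.length : Int)) 2 := by
      by_cases h1 : (pvTrans [c0] rest).2.length = 1
      · simp [pvCounterOf, h1]
      · simp [pvCounterOf, h1]
    simp only [to_minimum, to_minimum_alt, hs, hget]
    rw [hinit, pvAloop rest [c0] ['1'] (by simp) hnod1, hF, hstr, hint]
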